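-- pv_equiv track=rewrite | github.com/nbarker2021/Aletheia2 | integration/slices/code/cqe_hasse_slice.py | _find_least_upper_bound
-- ===== SOURCE A (Python) =====
-- from typing import Dict, List, Tuple, Set, Any, Optional
--
-- def _find_least_upper_bound(a: str, b: str, elements: List[str],
--                            relations: Dict[Tuple[str, str], bool]) -> Optional[str]:
--     """Find least upper bound (join) of two elements"""
--
--     # Find all upper bounds
--     upper_bounds = []
--     for elem in elements:
--         if (relations.get((a, elem), False) and relations.get((b, elem), False)):
--             upper_bounds.append(elem)
--
--     if not upper_bounds:
--         return None
--
--     # Find minimal element among upper bounds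
--     for candidate in upper_bounds:
--         is_minimal = True
--         for other in upper_bounds:
--             if other != candidate and relations.get((other, candidate), False):
--                 is_minimal = False
--                 break
--         if is_minimal:
--             return candidate
--
--     return upper_bounds[0]  # Fallback
-- ===== SOURCE B (Python) =====
-- from typing import Dict, List, Tuple, Optional
--
-- def _find_least_upper_bound(a: str, b: str, elements: List[str],
--                             relations: Dict[Tuple[str, str], bool]) -> Optional[str]:
--     """Join of a and b: collect common upper bounds, then mark dominated ones by a
--     single linear pass over the relations table (instead of a pairwise candidate
--     scan), and return the first unmarked upper bound (fallback: first one)."""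
--     upper_bounds = [e for e in elements
--                     if relations.get((a, e), False) and relations.get((b, e), False)]
--     if not upper_bounds:
--         return None
--     ubset = set(upper_bounds)
--     dominated = set()
--     for (o, c), v in relations.items():
--         if v and o != c and o in ubset and c in ubset:
--             dominated.add(c)
--     for c in upper_bounds:
--         if c not in dominated:
--             return c
--     return upper_bounds[0]
-- ===== Notes on version B (the rewrite author's own statement) =====
-- stated objective: alternative
-- what changed: B replaces A's nested candidate-by-candidate dominance scan (for each upper bound, probe the dict for every other upper bound) by a single linear pass over the relations dict's items that marks dominated upper bounds, then picks the first unmarked one; the nested loop and its per-pair dict lookups disappear.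
import Mathlib
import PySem

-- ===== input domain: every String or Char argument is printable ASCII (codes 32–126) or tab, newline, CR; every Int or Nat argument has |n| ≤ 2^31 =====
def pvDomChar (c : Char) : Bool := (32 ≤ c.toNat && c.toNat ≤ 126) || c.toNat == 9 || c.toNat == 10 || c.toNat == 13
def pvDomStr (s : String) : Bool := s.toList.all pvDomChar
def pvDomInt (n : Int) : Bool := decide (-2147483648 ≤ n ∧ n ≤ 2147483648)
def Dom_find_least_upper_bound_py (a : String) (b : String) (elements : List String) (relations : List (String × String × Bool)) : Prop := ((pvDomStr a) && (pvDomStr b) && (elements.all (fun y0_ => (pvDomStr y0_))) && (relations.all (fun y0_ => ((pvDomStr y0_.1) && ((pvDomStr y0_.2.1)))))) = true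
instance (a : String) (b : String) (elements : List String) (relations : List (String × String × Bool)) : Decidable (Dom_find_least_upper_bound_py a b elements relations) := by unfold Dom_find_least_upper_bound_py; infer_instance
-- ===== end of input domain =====

-- B marks dominated upper bounds in ONE linear pass over the relations dict's items
-- instead of A's nested candidate-by-candidate dominance scan; alternative algorithm.

-- relations.get((x, y), False): dict as association list, first match
def relGetD (relations : List (String × String × Bool)) (x y : String) : Bool :=
  match relations.find? (fun p => p.1 == x && p.2.1 == y) with
  | some p => p.2.2
  | none => false

-- ===== PORT A =====
-- the outer 'for candidate in upper_bounds' loop with early return; the inner loop with break is List.any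
def aSelect (relations : List (String × String × Bool)) (ub : List String) : List String → Option String
  | [] => none
  | c :: rest =>
    if !(ub.any (fun o => (o != c) && relGetD relations o c)) then some c
    else aSelect relations ub rest

def find_least_upper_bound_py (a : String) (b : String) (elements : List String) (relations : List (String × String × Bool)) : Option String :=
  let ub := elements.foldl (fun acc e => if relGetD relations a e && relGetD relations b e then acc ++ [e] else acc) []
  if ub.isEmpty then none
  else
    match aSelect relations ub ub with
    | some c => some c
    | none => ub.head?

-- ===== PORT B =====
-- relations.items(): under the assoc-list dict convention (lookup = first match) the
-- dict's items are the FIRST occurrence of each key, in order; exact for the unique-key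
-- lists an actual Python dict produces.
def bItems : List (String × String × Bool) → PySem.Set (String × String) → List (String × String × Bool)
  | [], _ => []
  | (o, c, v) :: rest, seen =>
    if PySem.Set.contains seen (o, c) then bItems rest seen
    else (o, c, v) :: bItems rest (PySem.Set.add seen (o, c))

def find_least_upper_bound_py_alt (a : String) (b : String) (elements : List String) (relations : List (String × String × Bool)) : Option String :=
  let ub := elements.filter (fun e => relGetD relations a e && relGetD relations b e)
  if ub.isEmpty then none
  else
    let ubset : PySem.Set String := PySem.Set.ofList ub
    let dominated : PySem.Set String :=
      (bItems relations PySem.Set.empty).foldl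
        (fun s p => if p.2.2 && (p.1 != p.2.1) && PySem.Set.contains ubset p.1 && PySem.Set.contains ubset p.2.1
                    then PySem.Set.add s p.2.1 else s)
        PySem.Set.empty
    match ub.find? (fun c => !(PySem.Set.contains dominated c)) with
    | some c => some c
    | none => ub.head?

-- ===== PRECONDITION & SPEC =====
def Spec_find_least_upper_bound_py (a : String) (b : String) (elements : List String) (relations : List (String × String × Bool)) (out : Option String) : Prop := out = find_least_upper_bound_py_alt a b elements relations
instance (a : String) (b : String) (elements : List String) (relations : List (String × String × Bool)) (out : Option String) : Decidable (Spec_find_least_upper_bound_py a b elements relations out) := by unfold Spec_find_least_upper_bound_py; infer_instance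

-- ===== CLAIM (what is proved, stated in full; the proofs are below) =====
def Claim_equal_find_least_upper_bound_py : Prop := ∀ (a : String) (b : String) (elements : List String) (relations : List (String × String × Bool)), Dom_find_least_upper_bound_py a b elements relations → Spec_find_least_upper_bound_py a b elements relations (find_least_upper_bound_py a b elements relations)

-- ===== LEMMAS AND PROOFS =====

-- membership in bItems = key unseen and the entry is the FIRST match for its key
theorem bItems_mem (p : String × String × Bool) :
    ∀ (l : List (String × String × Bool)) (seen : PySem.Set (String × String)),
      p ∈ bItems l seen ↔
        (¬ (p.1, p.2.1) ∈ seen ∧ l.find? (fun q => q.1 == p.1 && q.2.1 == p.2.1) = some p) := by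
  intro l
  induction l with
  | nil => intro seen; simp [bItems]
  | cons q rest ih =>
    intro seen
    obtain ⟨o, c, v⟩ := q
    unfold bItems
    by_cases hseen : ((o, c) ∈ seen)
    · rw [if_pos ((PySem.Set.contains_iff _ _).mpr hseen), ih]
      rw [List.find?_cons]
      by_cases hkey : ((o, c) = (p.1, p.2.1))
      · have h1 : o = p.1 := congrArg Prod.fst hkey
        have h2 : c = p.2.1 := congrArg Prod.snd hkey
        subst h1; subst h2
        constructor
        · rintro ⟨hns, _⟩; exact absurd hseen hns
        · rintro ⟨hns, _⟩; exact absurd hseen hns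
      · have hpred : ((o, c, v).1 == p.1 && (o, c, v).2.1 == p.2.1) = false := by
          simp only [Bool.and_eq_false_iff, beq_eq_false_iff_ne, ne_eq]
          by_contra hcon
          push Not at hcon
          exact hkey (by simp [hcon.1, hcon.2])
        simp only [hpred]
    · rw [if_neg (by simp [hseen]), List.mem_cons, ih, List.find?_cons]
      by_cases hkey : ((o, c) = (p.1, p.2.1))
      · have h1 : o = p.1 := congrArg Prod.fst hkey
        have h2 : c = p.2.1 := congrArg Prod.snd hkey
        subst h1; subst h2
        have hpred : ((p.1, p.2.1, v).1 == p.1 && (p.1, p.2.1, v).2.1 == p.2.1) = true := by simp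
        simp only [hpred]
        constructor
        · rintro (heq | ⟨hns, _⟩)
          · exact ⟨hseen, by rw [heq]⟩
          · exact absurd ((PySem.Set.mem_add _ _ _).mpr (Or.inr rfl)) hns
        · rintro ⟨_, hfind⟩
          exact Or.inl (by injection hfind with h; exact h.symm)
      · have hpred : ((o, c, v).1 == p.1 && (o, c, v).2.1 == p.2.1) = false := by
          simp only [Bool.and_eq_false_iff, beq_eq_false_iff_ne, ne_eq]
          by_contra hcon
          push Not at hcon
          exact hkey (by simp [hcon.1, hcon.2])
        simp only [hpred]
        constructor
        · rintro (heq | ⟨hns, hfind⟩)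
          · subst heq; exact absurd rfl hkey
          · refine ⟨fun hmem => hns ((PySem.Set.mem_add _ _ _).mpr (Or.inl hmem)), hfind⟩
        · rintro ⟨hns, hfind⟩
          refine Or.inr ⟨fun hmem => ?_, hfind⟩
          rcases (PySem.Set.mem_add _ _ _).mp hmem with h | h
          · exact hns h
          · exact hkey h.symm

-- relGetD = true iff the first match for key (o, c) carries the value true
theorem relGetD_iff (relations : List (String × String × Bool)) (o c : String) :
    relGetD relations o c = true ↔
      relations.find? (fun q => q.1 == o && q.2.1 == c) = some (o, c, true) := by
  unfold relGetD
  cases hf : relations.find? (fun q => q.1 == o && q.2.1 == c) with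
  | none => simp
  | some q =>
    have hpred := List.find?_some hf
    obtain ⟨qo, qc, qv⟩ := q
    simp only [Bool.and_eq_true, beq_iff_eq] at hpred
    obtain ⟨h1, h2⟩ := hpred
    subst h1; subst h2
    show qv = true ↔ some (qo, qc, qv) = some (qo, qc, true)
    simp

-- membership in the dominated-set fold
theorem dominated_fold_mem (ubset : PySem.Set String) :
    ∀ (items : List (String × String × Bool)) (s : PySem.Set String) (x : String),
      x ∈ items.foldl
            (fun s p => if p.2.2 && (p.1 != p.2.1) && PySem.Set.contains ubset p.1 && PySem.Set.contains ubset p.2.1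
                        then PySem.Set.add s p.2.1 else s) s
        ↔ x ∈ s ∨ ∃ p ∈ items, p.2.1 = x ∧
            (p.2.2 && (p.1 != p.2.1) && PySem.Set.contains ubset p.1 && PySem.Set.contains ubset p.2.1) = true := by
  intro items
  induction items with
  | nil => intro s x; simp
  | cons p rest ih =>
    intro s x
    rw [List.foldl_cons]
    by_cases hP : (p.2.2 && (p.1 != p.2.1) && PySem.Set.contains ubset p.1 && PySem.Set.contains ubset p.2.1) = true
    · rw [if_pos hP, ih]
      simp only [PySem.Set.mem_add, List.mem_cons]
      constructor
      · rintro ((hs | rfl) | ⟨q, hq, hqx, hqP⟩)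
        · exact Or.inl hs
        · exact Or.inr ⟨p, Or.inl rfl, rfl, hP⟩
        · exact Or.inr ⟨q, Or.inr hq, hqx, hqP⟩
      · rintro (hs | ⟨q, hq | hq, hqx, hqP⟩)
        · exact Or.inl (Or.inl hs)
        · subst hq; exact Or.inl (Or.inr hqx.symm)
        · exact Or.inr ⟨q, hq, hqx, hqP⟩
    · rw [if_neg hP, ih]
      simp only [List.mem_cons]
      constructor
      · rintro (hs | ⟨q, hq, hqx, hqP⟩)
        · exact Or.inl hs
        · exact Or.inr ⟨q, Or.inr hq, hqx, hqP⟩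
      · rintro (hs | ⟨q, hq | hq, hqx, hqP⟩)
        · exact Or.inl hs
        · subst hq; exact absurd hqP hP
        · exact Or.inr ⟨q, hq, hqx, hqP⟩

-- for c an upper bound: c is in B's dominated set iff A's inner scan fires
theorem dominated_contains (relations : List (String × String × Bool)) (ub : List String)
    (c : String) (hc : c ∈ ub) :
    PySem.Set.contains
      ((bItems relations PySem.Set.empty).foldl
        (fun s p => if p.2.2 && (p.1 != p.2.1) && PySem.Set.contains (PySem.Set.ofList ub) p.1 && PySem.Set.contains (PySem.Set.ofList ub) p.2.1
                    then PySem.Set.add s p.2.1 else s)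
        PySem.Set.empty) c
      = ub.any (fun o => (o != c) && relGetD relations o c) := by
  cases hA : ub.any (fun o => (o != c) && relGetD relations o c) with
  | false =>
    rw [Bool.eq_false_iff]
    intro hcon
    have hmem := (PySem.Set.contains_iff _ _).mp hcon
    rw [dominated_fold_mem] at hmem
    rcases hmem with h0 | ⟨p, hp, hpx, hpP⟩
    · exact absurd h0 (List.not_mem_nil)
    · obtain ⟨o, c', v⟩ := p
      simp only at hpx; subst hpx
      simp only [Bool.and_eq_true] at hpP
      obtain ⟨⟨⟨hv, hne⟩, ho⟩, _⟩ := hpP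
      have hv' : v = true := hv
      subst hv'
      have hfind := ((bItems_mem (o, c', true) relations PySem.Set.empty).mp hp).2
      have hget : relGetD relations o c' = true := (relGetD_iff relations o c').mpr hfind
      have homem : o ∈ ub := by
        have := (PySem.Set.contains_iff _ _).mp ho
        exact (PySem.Set.mem_ofList _ _).mp this
      have : ub.any (fun o => (o != c') && relGetD relations o c') = true :=
        List.any_eq_true.mpr ⟨o, homem, by simp only [hne, hget, Bool.and_self]⟩
      rw [hA] at this; exact Bool.false_ne_true this
  | true =>
    obtain ⟨o, ho, hP⟩ := List.any_eq_true.mp hA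
    simp only [Bool.and_eq_true] at hP
    obtain ⟨hne, hget⟩ := hP
    have hfind := (relGetD_iff relations o c).mp hget
    have hitem : (o, c, true) ∈ bItems relations PySem.Set.empty :=
      (bItems_mem (o, c, true) relations PySem.Set.empty).mpr ⟨by simp [PySem.Set.empty], hfind⟩
    apply (PySem.Set.contains_iff _ _).mpr
    rw [dominated_fold_mem]
    refine Or.inr ⟨(o, c, true), hitem, rfl, ?_⟩
    have hoc : PySem.Set.contains (PySem.Set.ofList ub) o = true :=
      (PySem.Set.contains_iff _ _).mpr ((PySem.Set.mem_ofList _ _).mpr ho)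
    have hcc : PySem.Set.contains (PySem.Set.ofList ub) c = true :=
      (PySem.Set.contains_iff _ _).mpr ((PySem.Set.mem_ofList _ _).mpr hc)
    simp only [hne, hoc, hcc, Bool.and_self]

-- A's selection loop equals B's find? over the dominated set, for sublists of ub
theorem select_eq_find (relations : List (String × String × Bool)) (ub : List String) :
    ∀ (l : List String), (∀ x ∈ l, x ∈ ub) →
      aSelect relations ub l
        = l.find? (fun c => !(PySem.Set.contains
            ((bItems relations PySem.Set.empty).foldl
              (fun s p => if p.2.2 && (p.1 != p.2.1) && PySem.Set.contains (PySem.Set.ofList ub) p.1 && PySem.Set.contains (PySem.Set.ofList ub) p.2.1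
                          then PySem.Set.add s p.2.1 else s)
              PySem.Set.empty) c)) := by
  intro l
  induction l with
  | nil => intro _; rfl
  | cons c rest ih =>
    intro hsub
    have hc : c ∈ ub := hsub c (List.mem_cons_self ..)
    unfold aSelect
    rw [List.find?_cons, dominated_contains relations ub c hc]
    cases hP : ub.any (fun o => (o != c) && relGetD relations o c)
    · rfl
    · simpa using ih (fun x hx => hsub x (List.mem_cons_of_mem _ hx))

-- ===== VERDICT (by name: the statement is the Claim_ definition above) =====
theorem find_least_upper_bound_py_spec : Claim_equal_find_least_upper_bound_py := by
  intro a b elements relations _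
  unfold Spec_find_least_upper_bound_py find_least_upper_bound_py find_least_upper_bound_py_alt
  have hub : elements.foldl (fun acc e => if relGetD relations a e && relGetD relations b e then acc ++ [e] else acc) []
      = elements.filter (fun e => relGetD relations a e && relGetD relations b e) := by
    rw [PySem.List.foldl_append_if_eq_filter]
    simp
  rw [hub]
  set ub := elements.filter (fun e => relGetD relations a e && relGetD relations b e) with hdef
  by_cases hemp : ub.isEmpty
  · simp [hemp]
  · simp only [hemp, if_neg, Bool.not_eq_true]
    rw [select_eq_find relations ub ub (fun x hx => hx)]
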